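-- pv_equiv track=rewrite | github.com/Churchillbones/Clinical-Note-Quality-App | clinical_note_quality/services/text_analysis_utils.py | has_temporal_conflict
-- ===== SOURCE A (Python) =====
-- from typing import List, Set, Dict, Optional
--
-- def has_temporal_conflict(temporal_set1: Set[str], temporal_set2: Set[str]) -> bool:
--     """Check for conflicting temporal indicators between two sets."""
--
--     # Define mutually exclusive temporal categories
--     conflicts = [
--         ({'morning'}, {'afternoon', 'evening'}),
--         ({'daily'}, {'weekly', 'monthly'}),
--         ({'hourly'}, {'daily', 'weekly'}),
--         ({'bid'}, {'daily', 'tid', 'qid'}),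
--         ({'tid'}, {'daily', 'bid', 'qid'}),
--         ({'qid'}, {'daily', 'bid', 'tid'}),
--     ]
--
--     for set_a, set_b in conflicts:
--         if (temporal_set1 & set_a and temporal_set2 & set_b) or \
--            (temporal_set1 & set_b and temporal_set2 & set_a):
--             return True
--
--     return False
-- ===== SOURCE B (Python) =====
-- _CONFLICT_MAP = {
--     'morning': {'afternoon', 'evening'},
--     'afternoon': {'morning'},
--     'evening': {'morning'},
--     'daily': {'weekly', 'monthly', 'hourly', 'bid', 'tid', 'qid'},
--     'weekly': {'daily', 'hourly'},
--     'monthly': {'daily'},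
--     'hourly': {'daily', 'weekly'},
--     'bid': {'daily', 'tid', 'qid'},
--     'tid': {'daily', 'bid', 'qid'},
--     'qid': {'daily', 'bid', 'tid'},
-- }
--
-- def has_temporal_conflict(temporal_set1, temporal_set2):
--     """Check for conflicting temporal indicators between two sets."""
--     for a in temporal_set1:
--         peers = _CONFLICT_MAP.get(a)
--         if peers is not None:
--             for b in temporal_set2:
--                 if b in peers:
--                     return True
--     return False
-- ===== Notes on version B (the rewrite author's own statement) =====
-- stated objective: idiomatic
-- what changed: Replaces the loop over six pair-of-set conflict groups with repeated set intersections by a precomputed symmetric adjacency map from each term to its conflicting terms, scanned once per element of the two inputs.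
import Mathlib
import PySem

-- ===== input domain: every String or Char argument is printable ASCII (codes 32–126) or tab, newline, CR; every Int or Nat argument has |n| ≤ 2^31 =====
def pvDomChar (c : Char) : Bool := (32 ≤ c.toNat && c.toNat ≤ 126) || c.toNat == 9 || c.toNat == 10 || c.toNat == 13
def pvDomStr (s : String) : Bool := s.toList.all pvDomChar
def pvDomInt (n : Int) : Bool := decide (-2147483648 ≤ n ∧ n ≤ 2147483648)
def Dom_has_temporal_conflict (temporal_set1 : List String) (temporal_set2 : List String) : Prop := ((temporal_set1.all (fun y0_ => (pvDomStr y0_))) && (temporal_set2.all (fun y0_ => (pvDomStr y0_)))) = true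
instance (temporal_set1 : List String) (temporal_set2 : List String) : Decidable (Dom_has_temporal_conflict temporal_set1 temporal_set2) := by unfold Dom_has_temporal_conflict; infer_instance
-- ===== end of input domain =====

-- B replaces A's loop over six pair-of-set conflict groups (set intersections) by a
-- precomputed symmetric term→conflicting-terms adjacency map scanned per input element
-- (objective: idiomatic; same behaviour, return value only).

-- ===== PORT A =====
-- the six mutually exclusive temporal categories, as in A
def pvConflicts : List (List String × List String) :=
  [ (["morning"], ["afternoon", "evening"]),
    (["daily"], ["weekly", "monthly"]),
    (["hourly"], ["daily", "weekly"]),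
    (["bid"], ["daily", "tid", "qid"]),
    (["tid"], ["daily", "bid", "qid"]),
    (["qid"], ["daily", "bid", "tid"]) ]

def has_temporal_conflict (temporal_set1 : List String) (temporal_set2 : List String) : Bool :=
  -- for set_a, set_b in conflicts: if (s1 & set_a and s2 & set_b) or (s1 & set_b and s2 & set_a): return True
  pvConflicts.any (fun p =>
    (!(PySem.Set.inter temporal_set1 p.1).isEmpty && !(PySem.Set.inter temporal_set2 p.2).isEmpty) ||
    (!(PySem.Set.inter temporal_set1 p.2).isEmpty && !(PySem.Set.inter temporal_set2 p.1).isEmpty))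

-- ===== PORT B =====
-- symmetric adjacency map: term -> set of terms it mutually conflicts with
def pvConflictMap : PySem.Dict String (List String) :=
  PySem.Dict.ofList
    [ ("morning", ["afternoon", "evening"]),
      ("afternoon", ["morning"]),
      ("evening", ["morning"]),
      ("daily", ["weekly", "monthly", "hourly", "bid", "tid", "qid"]),
      ("weekly", ["daily", "hourly"]),
      ("monthly", ["daily"]),
      ("hourly", ["daily", "weekly"]),
      ("bid", ["daily", "tid", "qid"]),
      ("tid", ["daily", "bid", "qid"]),
      ("qid", ["daily", "bid", "tid"]) ]

def has_temporal_conflict_alt (temporal_set1 : List String) (temporal_set2 : List String) : Bool :=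
  temporal_set1.any (fun a =>
    match pvConflictMap.get? a with
    | some peers => temporal_set2.any (fun b => peers.contains b)
    | none => false)

-- ===== PRECONDITION & SPEC =====
def Spec_has_temporal_conflict (temporal_set1 : List String) (temporal_set2 : List String) (out : Bool) : Prop := out = has_temporal_conflict_alt temporal_set1 temporal_set2
instance (temporal_set1 : List String) (temporal_set2 : List String) (out : Bool) : Decidable (Spec_has_temporal_conflict temporal_set1 temporal_set2 out) := by unfold Spec_has_temporal_conflict; infer_instance

-- ===== CLAIM (what is proved, stated in full; the proofs are below) =====
def Claim_equal_has_temporal_conflict : Prop := ∀ (temporal_set1 : List String) (temporal_set2 : List String), Dom_has_temporal_conflict temporal_set1 temporal_set2 → Spec_has_temporal_conflict temporal_set1 temporal_set2 (has_temporal_conflict temporal_set1 temporal_set2)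

-- ===== LEMMAS AND PROOFS =====

-- pointwise: the adjacency map has exactly the edges of the six conflict groups (symmetrised)
def pvPairs : List (String × List String) :=
  [ ("morning", ["afternoon", "evening"]),
    ("afternoon", ["morning"]),
    ("evening", ["morning"]),
    ("daily", ["weekly", "monthly", "hourly", "bid", "tid", "qid"]),
    ("weekly", ["daily", "hourly"]),
    ("monthly", ["daily"]),
    ("hourly", ["daily", "weekly"]),
    ("bid", ["daily", "tid", "qid"]),
    ("tid", ["daily", "bid", "qid"]),
    ("qid", ["daily", "bid", "tid"]) ]

lemma pv_map_eq : pvConflictMap = PySem.Dict.mk pvPairs := by decide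

-- pointwise: the adjacency map has exactly the edges of the six conflict groups (symmetrised)
lemma pv_edge_iff (a b : String) :
    (match pvConflictMap.get? a with
     | some peers => peers.contains b
     | none => false) = true ↔
    ∃ p ∈ pvConflicts, (a ∈ p.1 ∧ b ∈ p.2) ∨ (a ∈ p.2 ∧ b ∈ p.1) := by
  rw [pv_map_eq]
  by_cases hmem : a ∈ (["morning", "afternoon", "evening", "daily", "weekly",
      "monthly", "hourly", "bid", "tid", "qid"] : List String)
  · simp only [List.mem_cons, List.not_mem_nil, or_false] at hmem
    rcases hmem with h | h | h | h | h | h | h | h | h | h <;> subst h <;>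
      simp [PySem.Dict.get?, pvPairs, pvConflicts] <;> tauto
  · have hfind : List.find? (fun p => p.1 == a) pvPairs = none := by
      rw [List.find?_eq_none]
      intro p hp
      simp only [pvPairs, List.mem_cons, List.not_mem_nil, or_false] at hp
      rcases hp with h | h | h | h | h | h | h | h | h | h <;> subst h <;>
        simp only [beq_eq_false_iff_ne, ne_eq, Bool.not_eq_true] <;>
        (intro h; apply hmem; subst h; simp)
    simp only [PySem.Dict.get?, hfind, Option.map_none]
    simp only [pvConflicts]
    simp_all

lemma pv_match_any (o : Option (List String)) (l : List String) :
    (match o with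
     | some peers => l.any (fun b => peers.contains b)
     | none => false)
    = l.any (fun b =>
        (match o with
         | some peers => peers.contains b
         | none => false)) := by
  cases o <;> simp

lemma pv_inter_nonempty (s t : List String) :
    ((!(PySem.Set.inter s t).isEmpty) = true) ↔ ∃ x ∈ s, x ∈ t := by
  simp only [Bool.not_eq_true', List.isEmpty_eq_false_iff, ne_eq]
  constructor
  · intro h
    rcases hl : PySem.Set.inter s t with _ | ⟨x, xs⟩
    · exact absurd hl h
    · have hx : x ∈ PySem.Set.inter s t := by rw [hl]; exact List.mem_cons_self
      exact ⟨x, ((PySem.Set.mem_inter _ _ _).mp hx).1, ((PySem.Set.mem_inter _ _ _).mp hx).2⟩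
  · rintro ⟨x, hxs, hxt⟩ h
    have hx : x ∈ PySem.Set.inter s t := (PySem.Set.mem_inter _ _ _).mpr ⟨hxs, hxt⟩
    rw [h] at hx
    exact List.not_mem_nil hx

theorem has_temporal_conflict_spec : Claim_equal_has_temporal_conflict := by
  intro s1 s2 _
  unfold Spec_has_temporal_conflict
  rw [Bool.eq_iff_iff]
  simp only [has_temporal_conflict, has_temporal_conflict_alt, pv_match_any,
    List.any_eq_true, Bool.or_eq_true, Bool.and_eq_true, pv_inter_nonempty, pv_edge_iff]
  constructor
  · rintro ⟨p, hp, ⟨⟨x, hx, hxp⟩, ⟨y, hy, hyp⟩⟩ | ⟨⟨x, hx, hxp⟩, ⟨y, hy, hyp⟩⟩⟩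
    · exact ⟨x, hx, y, hy, p, hp, Or.inl ⟨hxp, hyp⟩⟩
    · exact ⟨x, hx, y, hy, p, hp, Or.inr ⟨hxp, hyp⟩⟩
  · rintro ⟨x, hx, y, hy, p, hp, ⟨hxp, hyp⟩ | ⟨hxp, hyp⟩⟩
    · exact ⟨p, hp, Or.inl ⟨⟨x, hx, hxp⟩, ⟨y, hy, hyp⟩⟩⟩
    · exact ⟨p, hp, Or.inr ⟨⟨x, hx, hxp⟩, ⟨y, hy, hyp⟩⟩⟩
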